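-- pv_equiv track=rewrite | github.com/frostyjaws/amazon-parent-rebuild | helpers/util.py | injected_bullets
-- ===== SOURCE A (Python) =====
-- from typing import List, Dict, Tuple
--
-- def injected_bullets(keywords: List[str], base_bullets: List[str]) -> List[str]:
--     """
--     One-time use rule: first 4-5 keywords replace first N bullets; if fewer,
--     keep remaining base bullets.
--     """
--     bullets = base_bullets[:] if base_bullets else []
--     if not bullets:
--         return [*keywords[:5]]
--     out = []
--     kw_i = 0
--     for i, b in enumerate(bullets):
--         if kw_i < len(keywords) and i < 5:
--             out.append(f"{b} ({keywords[kw_i]})")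
--             kw_i += 1
--         else:
--             out.append(b)
--     return out
-- ===== SOURCE B (Python) =====
-- from typing import List
--
-- def _annotate(kws: List[str], bs: List[str]) -> List[str]:
--     # Structural recursion: annotate bullets with keywords pairwise until
--     # either list runs out; leftover bullets pass through unchanged.
--     if not kws or not bs:
--         return bs[:]
--     return [f"{bs[0]} ({kws[0]})"] + _annotate(kws[1:], bs[1:])
--
-- def injected_bullets(keywords: List[str], base_bullets: List[str]) -> List[str]:
--     if not base_bullets:
--         return [*keywords[:5]]
--     return _annotate(keywords[:5], base_bullets)
-- ===== Notes on version B (the rewrite author's own statement) =====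
-- stated objective: alternative
-- what changed: Replaced A's indexed loop with kw_i counter and i<5 guard by pre-truncating keywords to 5 and a structural co-recursion over the two lists that annotates pairwise until one runs out, with no indices or counters at all.
import Mathlib
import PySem

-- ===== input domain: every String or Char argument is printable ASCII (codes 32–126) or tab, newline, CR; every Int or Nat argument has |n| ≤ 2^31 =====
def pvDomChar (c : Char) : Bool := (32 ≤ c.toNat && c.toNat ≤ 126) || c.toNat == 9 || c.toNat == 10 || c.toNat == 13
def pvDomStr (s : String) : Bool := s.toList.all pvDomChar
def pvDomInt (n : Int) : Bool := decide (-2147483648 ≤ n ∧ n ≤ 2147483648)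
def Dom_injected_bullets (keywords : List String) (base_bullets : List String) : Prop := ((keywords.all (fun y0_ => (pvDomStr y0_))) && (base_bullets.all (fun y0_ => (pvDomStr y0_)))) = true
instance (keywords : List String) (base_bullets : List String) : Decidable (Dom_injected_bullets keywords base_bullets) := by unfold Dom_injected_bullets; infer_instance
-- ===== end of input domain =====

-- B replaces A's indexed loop (kw_i counter, i < 5 guard) by pre-truncating the keywords to 5
-- and a structural co-recursion over the two lists, with no indices; objective: alternative.

-- ===== PORT A =====
-- the for-loop over enumerate(bullets) with state kw_i; out.append becomes cons on the result
def injLoopA (keywords : List String) : Nat → Nat → List String → List String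
  | _, _, [] => []
  | i, kw_i, b :: rest =>
    if kw_i < keywords.length && i < 5 then
      (b ++ " (" ++ keywords.getD kw_i "" ++ ")") :: injLoopA keywords (i+1) (kw_i+1) rest
    else
      b :: injLoopA keywords (i+1) kw_i rest

def injected_bullets (keywords : List String) (base_bullets : List String) : List String :=
  let bullets := base_bullets
  if bullets = [] then keywords.take 5
  else injLoopA keywords 0 0 bullets

-- ===== PORT B =====
-- _annotate: 'if not kws or not bs: return bs[:]', else cons and recurse on both tails
def injAnnotate : List String → List String → List String
  | [], bs => bs
  | _ :: _, [] => []
  | k :: ks, b :: bs => (b ++ " (" ++ k ++ ")") :: injAnnotate ks bs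

def injected_bullets_alt (keywords : List String) (base_bullets : List String) : List String :=
  if base_bullets = [] then keywords.take 5
  else injAnnotate (keywords.take 5) base_bullets

-- ===== PRECONDITION & SPEC =====
def Spec_injected_bullets (keywords : List String) (base_bullets : List String) (out : List String) : Prop := out = injected_bullets_alt keywords base_bullets
instance (keywords : List String) (base_bullets : List String) (out : List String) : Decidable (Spec_injected_bullets keywords base_bullets out) := by unfold Spec_injected_bullets; infer_instance

-- ===== CLAIM (what is proved, stated in full; the proofs are below) =====
def Claim_equal_injected_bullets : Prop := ∀ (keywords : List String) (base_bullets : List String), Dom_injected_bullets keywords base_bullets → Spec_injected_bullets keywords base_bullets (injected_bullets keywords base_bullets)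

-- ===== LEMMAS AND PROOFS =====
-- Once A's loop condition fails (keywords exhausted or index ≥ 5), it copies the rest unchanged.
theorem injLoopA_const (kws : List String) (bs : List String) (i kw_i : Nat)
    (h : ¬ kw_i < kws.length ∨ ¬ i < 5) : injLoopA kws i kw_i bs = bs := by
  induction bs generalizing i with
  | nil => rfl
  | cons b rest ih =>
    simp only [injLoopA]
    rw [if_neg (by simp only [Bool.and_eq_true, decide_eq_true_eq]; omega)]
    rw [ih (i+1) (by omega)]

-- A's loop at index i (with kw_i = min i (min 5 |kws|), its invariant) is B's co-recursion
-- on the truncated keywords after dropping i of them.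
theorem injLoopA_eq_annotate (kws : List String) (bs : List String) (i : Nat) :
    injLoopA kws i (min i (min 5 kws.length)) bs = injAnnotate ((kws.take 5).drop i) bs := by
  induction bs generalizing i with
  | nil =>
    cases h : (kws.take 5).drop i with
    | nil => rfl
    | cons k ks => rfl
  | cons b rest ih =>
    set L := min 5 kws.length with hL
    by_cases h : i < L
    · have hmin : min i L = i := by omega
      have hmin' : min (i+1) L = i + 1 := by omega
      have hlen : i < (kws.take 5).length := by simp [hL] at h ⊢; omega
      have hdrop : (kws.take 5).drop i = (kws.take 5)[i] :: (kws.take 5).drop (i+1) :=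
        List.drop_eq_getElem_cons hlen
      simp only [injLoopA, hmin]
      rw [if_pos (by simp only [Bool.and_eq_true, decide_eq_true_eq]; omega)]
      rw [hdrop]
      simp only [injAnnotate]
      have hget : (kws.take 5)[i] = kws[i]'(by omega) := List.getElem_take
      have hgetD : kws.getD i "" = kws[i]'(by omega) := List.getD_eq_getElem _ _ (by omega)
      rw [hget, hgetD]
      have h2 := ih (i+1)
      rw [hmin'] at h2
      exact congrArg (List.cons _) h2
    · have hmin : min i L = L := by omega
      have hdrop : (kws.take 5).drop i = [] := by
        apply List.drop_eq_nil_of_le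
        simp [hL] at h ⊢; omega
      rw [hmin, hdrop]
      have : injAnnotate [] (b :: rest) = b :: rest := rfl
      rw [this]
      exact injLoopA_const kws (b :: rest) i L (by omega)

-- ===== VERDICT (by name: the statement is the Claim_ definition above) =====
theorem injected_bullets_spec : Claim_equal_injected_bullets := by
  intro kws bs _
  unfold Spec_injected_bullets injected_bullets injected_bullets_alt
  by_cases hb : bs = []
  · simp [hb]
  · simp only [hb, if_false]
    have h0 := injLoopA_eq_annotate kws bs 0
    simpa using h0
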